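-- pv_equiv track=rewrite | github.com/aduerig/advent_of_code | 2015/11.py | third_req
-- ===== SOURCE A (Python) =====
-- def third_req(password):
--     last = None
--     for i in range(len(password) - 1):
--         if password[i] == password[i+1]:
--             if last is None:
--                 last = password[i]
--             elif last != password[i]:
--                 return True
--     return False
-- ===== SOURCE B (Python) =====
-- def third_req(password):
--     # Group the password into maximal runs of equal characters; collect the
--     # distinct characters whose run has length >= 2; need at least two of them.
--     doubled = set()
--     n = len(password)
--     i = 0
--     while i < n:
--         j = i + 1
--         while j < n and password[j] == password[i]:
--             j += 1
--         if j - i >= 2: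
--             doubled.add(password[i])
--         i = j
--     return len(doubled) >= 2
-- ===== Notes on version B (the rewrite author's own statement) =====
-- stated objective: alternative
-- what changed: B splits the string into maximal runs of equal characters and collects the set of characters having a run of length >= 2, returning whether that set has at least two elements, instead of A's pairwise adjacent scan that remembers the single letter of the first pair and early-returns.
import Mathlib
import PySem

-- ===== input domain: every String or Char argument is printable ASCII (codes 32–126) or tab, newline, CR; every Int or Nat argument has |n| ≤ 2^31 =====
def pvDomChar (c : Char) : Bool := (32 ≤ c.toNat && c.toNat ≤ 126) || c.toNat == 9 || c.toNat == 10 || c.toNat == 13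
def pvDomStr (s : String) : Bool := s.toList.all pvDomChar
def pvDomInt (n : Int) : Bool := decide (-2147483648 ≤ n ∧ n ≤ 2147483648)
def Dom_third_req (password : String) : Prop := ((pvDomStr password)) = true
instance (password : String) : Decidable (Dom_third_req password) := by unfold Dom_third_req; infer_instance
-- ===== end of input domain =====

-- B groups the string into maximal runs of equal characters and counts the distinct
-- characters owning a run of length >= 2, instead of A's single-'last' adjacent scan
-- (objective: alternative decomposition, same cost).

-- ===== PORT A =====
-- A's index loop 'for i in range(len-1): compare p[i], p[i+1]' rendered as the obvious
-- structural recursion over the character list, carrying the same 'last' state.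
def aLoop : List Char → Option Char → Bool
  | a :: b :: rest, last =>
    if a = b then
      match last with
      | none => aLoop (b :: rest) (some a)
      | some c => if c ≠ a then true else aLoop (b :: rest) (some c)
    else aLoop (b :: rest) last
  | _, _ => false

def third_req (password : String) : Bool := aLoop password.toList none

-- ===== PORT B =====
-- B's outer while-loop: consume one maximal run per step (inner while = takeWhile/dropWhile),
-- adding the run's character to the set when the run length is >= 2.
def bScan : List Char → PySem.Set Char → PySem.Set Char
  | [], s => s
  | c :: rest, s =>
    let run := rest.takeWhile (· = c)
    let s' := if run.length + 1 ≥ 2 then PySem.Set.add s c else s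
    bScan (rest.dropWhile (· = c)) s'
termination_by l _ => l.length
decreasing_by
  simp only [List.length_cons]
  exact Nat.lt_succ_of_le (List.length_dropWhile_le _ _)

def third_req_alt (password : String) : Bool :=
  decide (2 ≤ (bScan password.toList PySem.Set.empty).length)

-- ===== PRECONDITION & SPEC =====
def Spec_third_req (password : String) (out : Bool) : Prop := out = third_req_alt password
instance (password : String) (out : Bool) : Decidable (Spec_third_req password out) := by unfold Spec_third_req; infer_instance

-- ===== CLAIM (what is proved, stated in full; the proofs are below) =====
def Claim_equal_third_req : Prop := ∀ (password : String), Dom_third_req password → Spec_third_req password (third_req password)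

-- ===== LEMMAS AND PROOFS =====

/-- The characters of the adjacent equal pairs, in order (with repetitions). -/
def pairChars : List Char → List Char
  | a :: b :: r => if a = b then a :: pairChars (b :: r) else pairChars (b :: r)
  | _ => []

lemma aLoop_some (l : List Char) (c : Char) :
    aLoop l (some c) = decide (∃ d ∈ pairChars l, d ≠ c) := by
  induction l generalizing c with
  | nil => simp [aLoop, pairChars]
  | cons a t ih =>
    cases t with
    | nil => simp [aLoop, pairChars]
    | cons b r =>
      by_cases hab : a = b
      · simp only [aLoop, pairChars, if_pos hab]
        by_cases hca : c = a
        · subst hca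
          rw [if_neg (by simp), ih, decide_eq_decide]
          constructor
          · rintro ⟨d, hd, hda⟩; exact ⟨d, List.mem_cons_of_mem _ hd, hda⟩
          · rintro ⟨d, hd, hda⟩
            rcases List.mem_cons.1 hd with rfl | hd'
            · exact absurd rfl hda
            · exact ⟨d, hd', hda⟩
        · have hca' : c ≠ a := hca
          rw [if_pos hca', eq_comm, decide_eq_true_iff]
          exact ⟨a, List.mem_cons_self, fun h => hca h.symm⟩
      · simp [aLoop, pairChars, hab, ih]

lemma exists_pair_cons (a : Char) (t : List Char) :
    (∃ x ∈ a :: t, ∃ y ∈ a :: t, x ≠ y) ↔ ∃ d ∈ t, d ≠ a := by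
  constructor
  · rintro ⟨x, hx, y, hy, hxy⟩
    by_cases hxa : x = a
    · rcases List.mem_cons.1 hy with hya | hyt
      · exact absurd (hxa.trans hya.symm) hxy
      · exact ⟨y, hyt, fun h => hxy (hxa.trans h.symm)⟩
    · rcases List.mem_cons.1 hx with hxa' | hxt
      · exact absurd hxa' hxa
      · exact ⟨x, hxt, hxa⟩
  · rintro ⟨d, hd, hda⟩
    exact ⟨d, List.mem_cons_of_mem _ hd, a, List.mem_cons_self, hda⟩

lemma aLoop_none (l : List Char) :
    aLoop l none = decide (∃ x ∈ pairChars l, ∃ y ∈ pairChars l, x ≠ y) := by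
  induction l with
  | nil => simp [aLoop, pairChars]
  | cons a t ih =>
    cases t with
    | nil => simp [aLoop, pairChars]
    | cons b r =>
      by_cases hab : a = b
      · simp only [aLoop, pairChars, if_pos hab, aLoop_some]
        exact (decide_eq_decide).2 (exists_pair_cons a (pairChars (b :: r))).symm
      · simp [aLoop, pairChars, hab, ih]

lemma mem_pairChars_run (c : Char) (rest : List Char) (x : Char) :
    x ∈ pairChars (c :: rest) ↔
      (rest.takeWhile (· = c) ≠ [] ∧ x = c) ∨ x ∈ pairChars (rest.dropWhile (· = c)) := by
  induction rest with
  | nil => simp [pairChars]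
  | cons b r ih =>
    by_cases hbc : b = c
    · subst hbc
      simp only [pairChars, List.mem_cons, List.takeWhile_cons, List.dropWhile_cons,
        decide_true, ite_true]
      rw [ih]
      constructor
      · rintro (rfl | (⟨-, rfl⟩ | h))
        · exact Or.inl ⟨by simp, rfl⟩
        · exact Or.inl ⟨by simp, rfl⟩
        · exact Or.inr h
      · rintro (⟨-, rfl⟩ | h)
        · exact Or.inl rfl
        · exact Or.inr (Or.inr h)
    · have h1 : ¬ c = b := fun h => hbc h.symm
      simp [pairChars, h1, hbc]

lemma mem_bScan (l : List Char) (s : PySem.Set Char) (x : Char) :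
    x ∈ bScan l s ↔ x ∈ s ∨ x ∈ pairChars l := by
  induction l, s using bScan.induct with
  | case1 s => simp [bScan, pairChars]
  | case2 c rest s run s' ih =>
    rw [bScan]
    show x ∈ bScan (rest.dropWhile (· = c)) s' ↔ _
    rw [ih, mem_pairChars_run]
    by_cases hrun : rest.takeWhile (· = c) = []
    · have hF : ¬ (run.length + 1 ≥ 2) := by
        simp only [run, hrun]; simp
      simp only [s']
      rw [dif_neg hF]
      tauto
    · have hlen : run.length + 1 ≥ 2 := by
        have := List.length_pos_of_ne_nil (hrun : rest.takeWhile (· = c) ≠ [])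
        simp only [run]; omega
      simp only [s']
      rw [dif_pos hlen]
      simp only [PySem.Set.mem_add]
      constructor
      · rintro ((h | rfl) | h)
        · tauto
        · exact Or.inr (Or.inl ⟨hrun, rfl⟩)
        · tauto
      · rintro (h | (⟨-, rfl⟩ | h)) <;> tauto

lemma nodup_bScan (l : List Char) (s : PySem.Set Char) (hs : s.Nodup) :
    (bScan l s).Nodup := by
  induction l, s using bScan.induct with
  | case1 s => simpa [bScan] using hs
  | case2 c rest s run s' ih =>
    rw [bScan]
    apply ih
    by_cases h : run.length + 1 ≥ 2
    · show (if h : run.length + 1 ≥ 2 then PySem.Set.add s c else s).Nodup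
      rw [dif_pos h]
      exact PySem.Set.nodup_add s c hs
    · show (if h : run.length + 1 ≥ 2 then PySem.Set.add s c else s).Nodup
      rw [dif_neg h]
      exact hs

lemma two_le_length_iff_exists_pair {S : List Char} (hS : S.Nodup) :
    2 ≤ S.length ↔ ∃ x ∈ S, ∃ y ∈ S, x ≠ y := by
  cases S with
  | nil => simp
  | cons a t =>
    cases t with
    | nil => simp
    | cons b r =>
      have hab : a ≠ b := by
        intro h; subst h
        exact (List.nodup_cons.1 hS).1 List.mem_cons_self
      constructor
      · intro _
        exact ⟨a, List.mem_cons_self, b, List.mem_cons_of_mem _ List.mem_cons_self, hab⟩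
      · intro _
        simp only [List.length_cons]
        omega

-- ===== VERDICT (by name: the statement is the Claim_ definition above) =====
theorem third_req_spec : Claim_equal_third_req := by
  intro password _
  unfold Spec_third_req third_req third_req_alt
  rw [aLoop_none]
  apply (decide_eq_decide).2
  have hnd : (bScan password.toList PySem.Set.empty).Nodup :=
    nodup_bScan password.toList PySem.Set.empty List.nodup_nil
  rw [two_le_length_iff_exists_pair hnd]
  constructor
  · rintro ⟨x, hx, y, hy, hxy⟩
    exact ⟨x, (mem_bScan _ _ _).2 (Or.inr hx), y, (mem_bScan _ _ _).2 (Or.inr hy), hxy⟩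
  · rintro ⟨x, hx, y, hy, hxy⟩
    rcases (mem_bScan _ _ _).1 hx with h | hx'
    · exact absurd h List.not_mem_nil
    rcases (mem_bScan _ _ _).1 hy with h | hy'
    · exact absurd h List.not_mem_nil
    exact ⟨x, hx', y, hy', hxy⟩
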